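-- pv_equiv track=rewrite | github.com/nikitab724/voice_assistant | scripts/flask_server.py | _should_normalize_for_tts
-- ===== SOURCE A (Python) =====
-- def _should_normalize_for_tts(chunk: str) -> bool:
--     s = (chunk or "").strip()
--     if not s:
--         return False
--     if any(ch.isdigit() for ch in s):
--         return True
--     markdown_markers = ("```", "`", "#", "*", "|", "[", "]", "(", ")", "_")
--     if any(m in s for m in markdown_markers):
--         return True
--     if s.startswith("- ") or s.startswith("* "):
--         return True
--     # Simple numbered list prefix like "1. " or "2) "
--     if len(s) >= 3 and s[0].isdigit() and s[1] in {".", ")"} and s[2] == " ":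
--         return True
--     return False
-- ===== SOURCE B (Python) =====
-- _TTS_MARKS = set("`#*|[]()_")
--
-- def _should_normalize_for_tts(chunk: str) -> bool:
--     s = (chunk or "").strip()
--     if not s:
--         return False
--     # one pass: any digit or markdown marker character triggers normalization
--     for ch in s:
--         if ch.isdigit() or ch in _TTS_MARKS:
--             return True
--     # the only remaining trigger: a bullet "- " prefix ("* " is covered by '*')
--     return s.startswith("- ")
-- ===== Notes on version B (the rewrite author's own statement) =====
-- stated objective: simpler
-- what changed: Replaces A's four separate checks (per-char digit scan, a 10-marker substring scan, two startswith tests, a numbered-list prefix test) by one pass over the string against a fixed character set plus a single startswith('- '), using that every multi-char/prefix case except '- ' is subsumed by a single trigger character.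
import Mathlib
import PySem

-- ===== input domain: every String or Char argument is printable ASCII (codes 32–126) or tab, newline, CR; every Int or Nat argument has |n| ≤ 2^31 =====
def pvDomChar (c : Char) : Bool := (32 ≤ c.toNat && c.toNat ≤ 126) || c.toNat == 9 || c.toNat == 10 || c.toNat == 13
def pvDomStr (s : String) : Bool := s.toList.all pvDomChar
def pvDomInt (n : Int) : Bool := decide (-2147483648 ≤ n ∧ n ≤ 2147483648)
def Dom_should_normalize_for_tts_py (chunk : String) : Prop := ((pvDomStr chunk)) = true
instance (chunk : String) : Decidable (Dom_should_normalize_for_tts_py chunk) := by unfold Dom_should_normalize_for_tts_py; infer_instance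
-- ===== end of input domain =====

-- B folds A's four separate trigger checks into one pass over a fixed trigger-character set
-- plus a single startswith "- " test (objective: simpler).

-- ===== PORT A =====
-- the markdown_markers tuple of A, as lists of chars
def pvMarkers : List (List Char) :=
  [['`','`','`'], ['`'], ['#'], ['*'], ['|'], ['['], [']'], ['('], [')'], ['_']]

def should_normalize_for_tts_py (chunk : String) : Bool :=
  let s := PySem.Chars.strip chunk.toList
  if s.isEmpty then false
  else if s.any PySem.Chars.isdigit then true
  else if pvMarkers.any (fun m => PySem.Chars.isIn m s) then true
  else if PySem.Chars.startswith s ['-',' '] || PySem.Chars.startswith s ['*',' '] then true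
  else match s with
    -- len(s) >= 3 and s[0].isdigit() and s[1] in {".",")"} and s[2] == " "
    | c0 :: c1 :: c2 :: _ => PySem.Chars.isdigit c0 && (c1 == '.' || c1 == ')') && (c2 == ' ')
    | _ => false

-- ===== PORT B =====
def pvTriggerSet : PySem.Set Char :=
  PySem.Set.ofList ['`','#','*','|','[',']','(',')','_']

def should_normalize_for_tts_py_alt (chunk : String) : Bool :=
  let s := PySem.Chars.strip chunk.toList
  if s.isEmpty then false
  else if s.any (fun ch => PySem.Chars.isdigit ch || PySem.Set.contains pvTriggerSet ch) then true
  else PySem.Chars.startswith s ['-',' ']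

-- ===== PRECONDITION & SPEC =====
def Spec_should_normalize_for_tts_py (chunk : String) (out : Bool) : Prop := out = should_normalize_for_tts_py_alt chunk
instance (chunk : String) (out : Bool) : Decidable (Spec_should_normalize_for_tts_py chunk out) := by unfold Spec_should_normalize_for_tts_py; infer_instance

-- ===== CLAIM (what is proved, stated in full; the proofs are below) =====
def Claim_equal_should_normalize_for_tts_py : Prop := ∀ (chunk : String), Dom_should_normalize_for_tts_py chunk → Spec_should_normalize_for_tts_py chunk (should_normalize_for_tts_py chunk)

-- ===== LEMMAS AND PROOFS =====

-- a single-character substring test is membership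
theorem pv_singleton_infix {c : Char} {s : List Char} : [c] <:+: s ↔ c ∈ s := by
  constructor
  · intro h; exact h.subset (List.mem_singleton_self c)
  · intro h
    obtain ⟨t, u, rfl⟩ := List.mem_iff_append.mp h
    exact ⟨t, u, by simp⟩

-- membership in B's trigger set, unfolded to the literal list
theorem pv_trigger_mem (c : Char) :
    PySem.Set.contains pvTriggerSet c = true ↔
    c ∈ (['`','#','*','|','[',']','(',')','_'] : List Char) := by
  rw [PySem.Set.contains_iff, pvTriggerSet, PySem.Set.mem_ofList]

-- A's marker scan fires iff some character of s is in B's trigger set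
theorem pv_marker_iff (s : List Char) :
    (pvMarkers.any (fun m => PySem.Chars.isIn m s) = true) ↔
    (∃ c ∈ s, c ∈ (['`','#','*','|','[',']','(',')','_'] : List Char)) := by
  constructor
  · intro h
    obtain ⟨m, hm, hin⟩ := List.any_eq_true.mp h
    have hinf : m <:+: s := (PySem.Chars.isIn_iff_infix m s).mp hin
    fin_cases hm
    · exact ⟨'`', hinf.subset (by simp), by decide⟩
    · exact ⟨'`', hinf.subset (by simp), by decide⟩
    · exact ⟨'#', hinf.subset (by simp), by decide⟩
    · exact ⟨'*', hinf.subset (by simp), by decide⟩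
    · exact ⟨'|', hinf.subset (by simp), by decide⟩
    · exact ⟨'[', hinf.subset (by simp), by decide⟩
    · exact ⟨']', hinf.subset (by simp), by decide⟩
    · exact ⟨'(', hinf.subset (by simp), by decide⟩
    · exact ⟨')', hinf.subset (by simp), by decide⟩
    · exact ⟨'_', hinf.subset (by simp), by decide⟩
  · rintro ⟨c, hc, hct⟩
    refine List.any_eq_true.mpr ⟨[c], ?_, (PySem.Chars.isIn_iff_infix [c] s).mpr (pv_singleton_infix.mpr hc)⟩
    fin_cases hct <;> simp [pvMarkers]

-- the core equality, over an arbitrary character list (no domain assumption needed)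
theorem pv_body_eq (s : List Char) :
    (if s.isEmpty then false
     else if s.any PySem.Chars.isdigit then true
     else if pvMarkers.any (fun m => PySem.Chars.isIn m s) then true
     else if PySem.Chars.startswith s ['-',' '] || PySem.Chars.startswith s ['*',' '] then true
     else match s with
       | c0 :: c1 :: c2 :: _ => PySem.Chars.isdigit c0 && (c1 == '.' || c1 == ')') && (c2 == ' ')
       | _ => false) =
    (if s.isEmpty then false
     else if s.any (fun ch => PySem.Chars.isdigit ch || PySem.Set.contains pvTriggerSet ch) then true
     else PySem.Chars.startswith s ['-',' ']) := by
  by_cases he : s.isEmpty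
  · simp only [he, if_true]
  · simp only [he, Bool.false_eq_true, if_false]
    by_cases hd : s.any PySem.Chars.isdigit = true
    · have hT : s.any (fun ch => PySem.Chars.isdigit ch || PySem.Set.contains pvTriggerSet ch) = true := by
        obtain ⟨c, hc, hdc⟩ := List.any_eq_true.mp hd
        exact List.any_eq_true.mpr ⟨c, hc, by rw [hdc, Bool.true_or]⟩
      rw [hd, hT, if_pos rfl, if_pos rfl]
    · rw [Bool.not_eq_true] at hd
      by_cases hm : pvMarkers.any (fun m => PySem.Chars.isIn m s) = true
      · have hT : s.any (fun ch => PySem.Chars.isdigit ch || PySem.Set.contains pvTriggerSet ch) = true := by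
          obtain ⟨c, hc, hct⟩ := (pv_marker_iff s).mp hm
          exact List.any_eq_true.mpr ⟨c, hc, by rw [(pv_trigger_mem c).mpr hct, Bool.or_true]⟩
        rw [hd, hm, hT]
        simp
      · rw [Bool.not_eq_true] at hm
        -- no digit and no marker anywhere: B's scan comes up empty
        have hT : s.any (fun ch => PySem.Chars.isdigit ch || PySem.Set.contains pvTriggerSet ch) = false := by
          rw [Bool.eq_false_iff]
          intro h
          obtain ⟨c, hc, hcd⟩ := List.any_eq_true.mp h
          rcases Bool.or_eq_true_iff.mp hcd with h1 | h1
          · rw [List.any_eq_true.mpr ⟨c, hc, h1⟩] at hd; exact Bool.true_eq_false.mp hd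
          · rw [(pv_marker_iff s).mpr ⟨c, hc, (pv_trigger_mem c).mp h1⟩] at hm
            exact Bool.true_eq_false.mp hm
        -- a "* " prefix would put '*' in s, contradicting hm
        have hstar : PySem.Chars.startswith s ['*',' '] = false := by
          rw [Bool.eq_false_iff]
          intro h
          have h2 : '*' ∈ s := ((PySem.Chars.startswith_iff s ['*',' ']).mp h).subset (by simp)
          rw [(pv_marker_iff s).mpr ⟨'*', h2, by decide⟩] at hm
          exact Bool.true_eq_false.mp hm
        rw [hd, hm, hT, hstar]
        simp only [Bool.false_eq_true, if_false, Bool.or_false]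
        -- remaining: (if sw- then true else numbered) = sw-
        cases hsw : PySem.Chars.startswith s ['-',' ']
        · simp only [Bool.false_eq_true, if_false]
          -- the numbered-list branch would need a digit in s, contradicting hd
          match s with
          | [] => rfl
          | [_] => rfl
          | [_, _] => rfl
          | c0 :: c1 :: c2 :: rest =>
            rw [Bool.eq_false_iff]
            intro h
            have hd0 : PySem.Chars.isdigit c0 = true :=
              (Bool.and_eq_true_iff.mp (Bool.and_eq_true_iff.mp h).1).1
            rw [List.any_eq_true.mpr ⟨c0, by simp, hd0⟩] at hd
            exact Bool.true_eq_false.mp hd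
        · rfl

-- ===== VERDICT (by name: the statement is the Claim_ definition above) =====
theorem should_normalize_for_tts_py_spec : Claim_equal_should_normalize_for_tts_py := by
  intro chunk _
  unfold Spec_should_normalize_for_tts_py should_normalize_for_tts_py should_normalize_for_tts_py_alt
  exact pv_body_eq (PySem.Chars.strip chunk.toList)
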